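-- pv_equiv track=rewrite | github.com/bbakernoaa/rocotoviewer | utils/performance_utils.py | filter_tasks_efficiently
-- ===== SOURCE A (Python) =====
-- from typing import List, Dict, Any, Callable, Optional, Generator
--
-- def filter_tasks_efficiently(tasks: List[Dict[str, Any]],
--                             filters: Dict[str, Any]) -> List[Dict[str, Any]]:
--     """
--     Efficiently filter tasks based on multiple criteria.
--
--     Args:
--         tasks: List of task dictionaries
--         filters: Dictionary with filter criteria
--
--     Returns:
--         List of filtered task dictionaries
--     """
--     if not filters:
--         return tasks
--
--     # Use a single pass with multiple conditions
--     filtered_tasks = []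
--
--     for task in tasks:
--         include = True
--
--         # Apply status filter
--         if 'status' in filters and filters['status']:
--             if task.get('status', '').lower() != filters['status'].lower():
--                 include = False
--
--         # Apply search filter
--         if include and 'search' in filters and filters['search']:
--             search_term = filters['search'].lower()
--             task_text = f"{task.get('id', '')} {task.get('status', '')} {task.get('cycle', '')}".lower()
--             if search_term not in task_text:
--                 include = False
--
--         # Apply cycle filter
--         if include and 'cycle' in filters and filters['cycle']:
--             if filters['cycle'].lower() not in task.get('cycle', '').lower():
--                 include = False
--
--         if include:
--             filtered_tasks.append(task)
--
--     return filtered_tasks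
-- ===== SOURCE B (Python) =====
-- def filter_tasks_efficiently(tasks, filters):
--     """Staged filtering: one independent pass per active criterion."""
--     if not filters:
--         return tasks
--
--     result = list(tasks)
--
--     status = filters.get('status')
--     if status:
--         sl = status.lower()
--         result = [t for t in result if t.get('status', '').lower() == sl]
--
--     search = filters.get('search')
--     if search:
--         sl = search.lower()
--         result = [t for t in result
--                   if sl in f"{t.get('id', '')} {t.get('status', '')} {t.get('cycle', '')}".lower()]
--
--     cycle = filters.get('cycle')
--     if cycle:
--         cl = cycle.lower()
--         result = [t for t in result if cl in t.get('cycle', '').lower()]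
--
--     return result
-- ===== Notes on version B (the rewrite author's own statement) =====
-- stated objective: simpler
-- what changed: Replaced the single fused loop with a short-circuited include flag by one independent order-preserving filtering pass per active criterion (status, search, cycle), sequentially composed.
import Mathlib
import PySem

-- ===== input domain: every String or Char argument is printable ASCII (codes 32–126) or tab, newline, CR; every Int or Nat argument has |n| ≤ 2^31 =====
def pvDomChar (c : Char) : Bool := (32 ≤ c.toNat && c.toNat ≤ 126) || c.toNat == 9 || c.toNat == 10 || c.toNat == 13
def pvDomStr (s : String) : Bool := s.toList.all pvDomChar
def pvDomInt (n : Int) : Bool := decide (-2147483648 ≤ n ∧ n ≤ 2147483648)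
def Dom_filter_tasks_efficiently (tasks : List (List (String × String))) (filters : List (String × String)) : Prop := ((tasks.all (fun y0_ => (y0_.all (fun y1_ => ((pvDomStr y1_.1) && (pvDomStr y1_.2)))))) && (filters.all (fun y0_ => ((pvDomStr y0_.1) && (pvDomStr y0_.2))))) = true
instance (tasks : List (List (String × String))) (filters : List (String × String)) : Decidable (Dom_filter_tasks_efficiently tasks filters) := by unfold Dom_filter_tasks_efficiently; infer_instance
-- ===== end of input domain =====

-- B replaces A's fused loop with a short-circuited include flag by one independent
-- order-preserving filter pass per active criterion (objective: simpler decomposition; same cost).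

-- dict.get(k, '') on an association dict (first match)
def pvGetD (d : List (String × String)) (k : String) : String :=
  PySem.Dict.getD (PySem.Dict.mk d) k ""

-- the f"{id} {status} {cycle}" text both Pythons build
def pvTaskText (t : List (String × String)) : String :=
  PySem.Str.join " " [pvGetD t "id", pvGetD t "status", pvGetD t "cycle"]

-- ===== PORT A =====
-- the include-flag chain of A's loop body ('k' in filters and filters[k] truthy = getD k '' nonempty)
def pvAInclude (filters task : List (String × String)) : Bool :=
  let include1 :=
    (let v := pvGetD filters "status"
     if v ≠ "" then
       (if PySem.Str.lower (pvGetD task "status") ≠ PySem.Str.lower v then false else true)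
     else true)
  let include2 :=
    (if include1 then
       (let v := pvGetD filters "search"
        if v ≠ "" then
          (let searchTerm := PySem.Str.lower v
           let taskText := PySem.Str.lower (pvTaskText task)
           if ¬ (PySem.Str.isIn searchTerm taskText = true) then false else include1)
        else include1)
     else include1)
  let include3 :=
    (if include2 then
       (let v := pvGetD filters "cycle"
        if v ≠ "" then
          (if ¬ (PySem.Str.isIn (PySem.Str.lower v) (PySem.Str.lower (pvGetD task "cycle")) = true) then false else include2)
        else include2)
     else include2)
  include3

def filter_tasks_efficiently (tasks : List (List (String × String))) (filters : List (String × String)) : List (List (String × String)) :=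
  if filters.isEmpty then tasks
  else tasks.foldl (fun acc task => if pvAInclude filters task then acc ++ [task] else acc) []

-- ===== PORT B =====
def filter_tasks_efficiently_alt (tasks : List (List (String × String))) (filters : List (String × String)) : List (List (String × String)) :=
  if filters.isEmpty then tasks
  else
    let result := tasks
    let status := pvGetD filters "status"
    let result :=
      if status ≠ "" then
        result.filter (fun t => PySem.Str.lower (pvGetD t "status") = PySem.Str.lower status)
      else result
    let search := pvGetD filters "search"
    let result :=
      if search ≠ "" then
        result.filter (fun t => PySem.Str.isIn (PySem.Str.lower search) (PySem.Str.lower (pvTaskText t)))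
      else result
    let cycle := pvGetD filters "cycle"
    let result :=
      if cycle ≠ "" then
        result.filter (fun t => PySem.Str.isIn (PySem.Str.lower cycle) (PySem.Str.lower (pvGetD t "cycle")))
      else result
    result

-- ===== PRECONDITION & SPEC =====
def Spec_filter_tasks_efficiently (tasks : List (List (String × String))) (filters : List (String × String)) (out : List (List (String × String))) : Prop := out = filter_tasks_efficiently_alt tasks filters
instance (tasks : List (List (String × String))) (filters : List (String × String)) (out : List (List (String × String))) : Decidable (Spec_filter_tasks_efficiently tasks filters out) := by unfold Spec_filter_tasks_efficiently; infer_instance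

-- ===== CLAIM (what is proved, stated in full; the proofs are below) =====
def Claim_equal_filter_tasks_efficiently : Prop := ∀ (tasks : List (List (String × String))) (filters : List (String × String)), Dom_filter_tasks_efficiently tasks filters → Spec_filter_tasks_efficiently tasks filters (filter_tasks_efficiently tasks filters)

-- ===== LEMMAS AND PROOFS =====

-- A's include flag is the conjunction of the three stage predicates B filters by.
theorem pvAInclude_eq (filters task : List (String × String)) :
    pvAInclude filters task =
      ((!decide (pvGetD filters "status" ≠ "")
          || decide (PySem.Str.lower (pvGetD task "status") = PySem.Str.lower (pvGetD filters "status")))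
        && (!decide (pvGetD filters "search" ≠ "")
          || PySem.Str.isIn (PySem.Str.lower (pvGetD filters "search")) (PySem.Str.lower (pvTaskText task)))
        && (!decide (pvGetD filters "cycle" ≠ "")
          || PySem.Str.isIn (PySem.Str.lower (pvGetD filters "cycle")) (PySem.Str.lower (pvGetD task "cycle")))) := by
  unfold pvAInclude
  by_cases h1 : pvGetD filters "status" ≠ "" <;>
  by_cases h2 : pvGetD filters "search" ≠ "" <;>
  by_cases h3 : pvGetD filters "cycle" ≠ "" <;>
    simp only [h1, h2, h3, if_true, if_false, decide_true, decide_false, if_neg, if_pos,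
      Bool.not_true, Bool.not_false, Bool.false_or, Bool.true_or, Bool.true_and, Bool.and_true] <;>
    split_ifs <;> simp_all

-- ===== VERDICT (by name: the statement is the Claim_ definition above) =====
theorem filter_tasks_efficiently_spec : Claim_equal_filter_tasks_efficiently := by
  intro tasks filters _
  unfold Spec_filter_tasks_efficiently filter_tasks_efficiently filter_tasks_efficiently_alt
  by_cases hE : filters.isEmpty
  · simp [hE]
  · rw [if_neg hE, if_neg hE]
    rw [PySem.List.foldl_append_if_eq_filter]
    simp only [List.nil_append]
    by_cases h1 : pvGetD filters "status" ≠ "" <;>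
    by_cases h2 : pvGetD filters "search" ≠ "" <;>
    by_cases h3 : pvGetD filters "cycle" ≠ "" <;>
      simp only [h1, h2, h3, if_true, if_false, List.filter_filter, not_not, ite_not,
        not_true_eq_false, not_false_eq_true, ite_true, ite_false, if_pos, if_neg] <;>
      first
        | (apply List.filter_congr; intro t _;
           rw [pvAInclude_eq] <;> simp [h1, h2, h3, Bool.and_comm, Bool.and_left_comm])
        | (rw [List.filter_eq_self]; intro t _;
           rw [pvAInclude_eq]; simp [h1, h2, h3])
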